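-- pv_equiv track=rewrite | github.com/nimrahSohail/N-Queens-Game | n_queens-master/backtracking.py | bulletise
-- ===== SOURCE A (Python) =====
-- def bulletise(text):
--     if len(text) == 0:  # no text so no bullets
--         return ''
--     lines = text.split('\n')
--     parts = []
--     for line in lines:  # for each line
--         parts.extend(['\u2022', line, '\n'])  # prepend bullet and re append newline removed by split
--     return ''.join(parts)
-- ===== SOURCE B (Python) =====
-- def bulletise(text):
--     if len(text) == 0:  # no text so no bullets
--         return ''
--     return '\u2022' + text.replace('\n', '\n\u2022') + '\n'
-- ===== Notes on version B (the rewrite author's own statement) =====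
-- stated objective: idiomatic
-- what changed: Replaces the split/loop/extend/join pipeline with a single closed-form expression: one str.replace pass that inserts a bullet after every newline, plus a hand-prepended first bullet and appended final newline.
import Mathlib
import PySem

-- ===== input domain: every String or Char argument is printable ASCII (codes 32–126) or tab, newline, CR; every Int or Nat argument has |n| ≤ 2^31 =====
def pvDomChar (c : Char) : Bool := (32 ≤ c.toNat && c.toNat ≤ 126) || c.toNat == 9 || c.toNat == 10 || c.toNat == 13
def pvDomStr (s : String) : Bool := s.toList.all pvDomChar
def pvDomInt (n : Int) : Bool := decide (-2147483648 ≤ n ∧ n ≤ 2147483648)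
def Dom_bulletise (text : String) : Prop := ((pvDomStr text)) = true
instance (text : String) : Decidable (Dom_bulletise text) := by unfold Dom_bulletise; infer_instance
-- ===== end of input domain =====

-- B replaces A's split/loop/join pipeline with one closed-form str.replace expression (idiomatic, same cost).

-- ===== PORT A =====
def bulletise (text : String) : String :=
  if PySem.Str.len text == 0 then "" else
    let lines := (PySem.Str.split? text "\n").getD []
    let parts := lines.foldl (fun parts line => parts ++ ["\u2022", line, "\n"]) ([] : List String)
    PySem.Str.join "" parts

-- ===== PORT B =====
def bulletise_alt (text : String) : String :=
  if PySem.Str.len text == 0 then "" else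
    "\u2022" ++ PySem.Str.replace text "\n" "\n\u2022" ++ "\n"

-- ===== PRECONDITION & SPEC =====
def Spec_bulletise (text : String) (out : String) : Prop := out = bulletise_alt text
instance (text : String) (out : String) : Decidable (Spec_bulletise text out) := by unfold Spec_bulletise; infer_instance

-- ===== CLAIM (what is proved, stated in full; the proofs are below) =====
def Claim_equal_bulletise : Prop := ∀ (text : String), Dom_bulletise text → Spec_bulletise text (bulletise text)

-- ===== LEMMAS AND PROOFS =====

-- bulR cs = cs with a bullet inserted after every newline (what B's replace produces)
def bulR : List Char → List Char
  | [] => []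
  | c :: t => if c = '\n' then '\n' :: '\u2022' :: bulR t else c :: bulR t

-- bulG cs = bulR cs with a final newline appended
def bulG : List Char → List Char
  | [] => ['\n']
  | c :: t => if c = '\n' then '\n' :: '\u2022' :: bulG t else c :: bulG t

-- the pieces that splitOn produces, the current partial piece carried reversed in cur
def bulS : List Char → List Char → List (List Char)
  | cur, [] => [cur.reverse]
  | cur, c :: t => if c = '\n' then cur.reverse :: bulS [] t else bulS (c :: cur) t

theorem bulG_eq_bulR (l : List Char) : bulG l = bulR l ++ ['\n'] := by
  induction l with
  | nil => rfl
  | cons c t ih => by_cases h : c = '\n' <;> simp [bulG, bulR, h, ih]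

set_option maxRecDepth 4000 in
theorem replace_go_eq (l acc : List Char) (fuel : Nat) (h : l.length ≤ fuel) :
    PySem.Chars.replace.go ['\n'] ['\n', '\u2022'] fuel l acc = acc.reverse ++ bulR l := by
  induction l generalizing acc fuel with
  | nil => cases fuel <;> simp [PySem.Chars.replace.go, bulR]
  | cons c t ih =>
    cases fuel with
    | zero => simp at h
    | succ f =>
      simp only [List.length_cons, Nat.succ_le_succ_iff] at h
      by_cases hc : c = '\n'
      · subst hc
        rw [show PySem.Chars.replace.go ['\n'] ['\n', '\u2022'] (f+1) ('\n' :: t) acc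
              = PySem.Chars.replace.go ['\n'] ['\n', '\u2022'] f t ('\u2022' :: '\n' :: acc) by
            simp [PySem.Chars.replace.go, List.isPrefixOf]]
        rw [ih _ _ h]
        rw [show bulR ('\n' :: t) = '\n' :: '\u2022' :: bulR t from by
          rw [bulR]; rw [if_pos rfl]]
        simp
      · have hb : ('\n' == c) = false := by exact beq_eq_false_iff_ne.mpr (fun e => hc e.symm)
        rw [show PySem.Chars.replace.go ['\n'] ['\n', '\u2022'] (f+1) (c :: t) acc
              = PySem.Chars.replace.go ['\n'] ['\n', '\u2022'] f t (c :: acc) by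
            simp [PySem.Chars.replace.go, List.isPrefixOf, hb]]
        rw [ih _ _ h]
        simp [bulR, hc]

theorem replace_eq (cs : List Char) :
    PySem.Chars.replace cs ['\n'] ['\n', '\u2022'] = bulR cs := by
  rw [PySem.Chars.replace]
  rw [if_neg (by simp)]
  exact replace_go_eq cs [] cs.length le_rfl

set_option maxRecDepth 4000 in
theorem splitOn_go_eq (l cur : List Char) (acc : List (List Char)) (fuel : Nat) (h : l.length + 1 ≤ fuel) :
    PySem.Chars.splitOn.go ['\n'] fuel l cur acc = acc.reverse ++ bulS cur l := by
  induction l generalizing cur acc fuel with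
  | nil =>
    cases fuel with
    | zero => simp at h
    | succ f => simp [PySem.Chars.splitOn.go, bulS]
  | cons c t ih =>
    cases fuel with
    | zero => simp at h
    | succ f =>
      simp only [List.length_cons] at h
      have h' : t.length + 1 ≤ f := by omega
      by_cases hc : c = '\n'
      · subst hc
        rw [show PySem.Chars.splitOn.go ['\n'] (f+1) ('\n' :: t) cur acc
              = PySem.Chars.splitOn.go ['\n'] f t [] (cur.reverse :: acc) by
            simp [PySem.Chars.splitOn.go, List.isPrefixOf]]
        rw [ih _ _ _ h']
        rw [show bulS cur ('\n' :: t) = cur.reverse :: bulS [] t from by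
          rw [bulS]; rw [if_pos rfl]]
        simp
      · have hb : ('\n' == c) = false := by exact beq_eq_false_iff_ne.mpr (fun e => hc e.symm)
        rw [show PySem.Chars.splitOn.go ['\n'] (f+1) (c :: t) cur acc
              = PySem.Chars.splitOn.go ['\n'] f t (c :: cur) acc by
            simp [PySem.Chars.splitOn.go, List.isPrefixOf, hb]]
        rw [ih _ _ _ h']
        simp [bulS, hc]

theorem splitOn_eq (cs : List Char) :
    PySem.Chars.splitOn cs ['\n'] = bulS [] cs := by
  rw [PySem.Chars.splitOn]
  exact splitOn_go_eq cs [] [] (cs.length + 1) le_rfl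

theorem flatMap_bulS (l cur : List Char) :
    (bulS cur l).flatMap (fun p => '\u2022' :: (p ++ ['\n'])) = '\u2022' :: (cur.reverse ++ bulG l) := by
  induction l generalizing cur with
  | nil => simp [bulS, bulG]
  | cons c t ih => by_cases hc : c = '\n' <;> simp [bulS, bulG, hc, ih]

theorem join_nil_flatten (xs : List (List Char)) :
    PySem.Chars.join [] xs = xs.flatten := by
  rw [PySem.Chars.join]
  induction xs with
  | nil => rfl
  | cons a l ih =>
    cases l with
    | nil => simp [List.intercalate]
    | cons b t =>
      simp only [List.intercalate] at ih ⊢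
      simp [List.intersperse] at ih ⊢
      exact ih

theorem triples_flatten (M : List (List Char)) :
    ((M.flatMap (fun p => [['\u2022'], p, ['\n']]))).flatten
      = M.flatMap (fun p => '\u2022' :: (p ++ ['\n'])) := by
  induction M with
  | nil => rfl
  | cons a t ih => simp [List.flatMap_cons, ih]

theorem bulletise_spec : Claim_equal_bulletise := by
  intro text _
  unfold Spec_bulletise bulletise bulletise_alt
  have hnl : "\n".toList = ['\n'] := rfl
  have hbu : "\u2022".toList = ['\u2022'] := rfl
  have hnb : "\n\u2022".toList = ['\n', '\u2022'] := rfl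
  have hem : "".toList = ([] : List Char) := rfl
  by_cases h : PySem.Str.len text == 0
  · have ht : text = "" := by
      simp only [beq_iff_eq, PySem.Str.len] at h
      apply String.toList_inj.mp
      rw [hem]
      exact List.eq_nil_of_length_eq_zero (by exact_mod_cast h)
    simp [ht]
  · simp only [h, if_false, Bool.false_eq_true]
    obtain ⟨L, hL, hmap⟩ : ∃ L, PySem.Str.split? text "\n" = some L ∧
        L.map String.toList = PySem.Chars.splitOn text.toList ['\n'] := by
      have hsm := PySem.Str.split?_map text "\n"
      rw [show PySem.Chars.split? text.toList "\n".toList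
            = some (PySem.Chars.splitOn text.toList ['\n']) by
          rw [PySem.Chars.split?, if_neg (by simp [hnl])]
          rw [hnl]] at hsm
      cases hsp : PySem.Str.split? text "\n" with
      | none => rw [hsp] at hsm; simp at hsm
      | some L => rw [hsp] at hsm; simp at hsm; exact ⟨L, rfl, hsm⟩
    apply String.toList_inj.mp
    rw [hL]
    simp only [Option.getD_some]
    rw [PySem.List.foldl_append_eq_flatMap (fun line => ["\u2022", line, "\n"]) L []]
    simp only [List.nil_append, String.toList_append, PySem.Str.toList_replace,
      PySem.Str.toList_join]
    rw [show ((L.flatMap (fun line => ["\u2022", line, "\n"])).map String.toList)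
          = (L.map String.toList).flatMap (fun p => [['\u2022'], p, ['\n']]) by
        simp [List.map_flatMap, List.flatMap_map, hnl, hbu]]
    rw [hmap, hem, join_nil_flatten, triples_flatten, splitOn_eq, flatMap_bulS]
    rw [hnl, hnb, hbu, replace_eq, bulG_eq_bulR]
    simp
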